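-- pv_equiv track=rewrite | github.com/RL8/mb-1shot | lyrics_retrieval_proof.py | analyze_lyrics
-- ===== SOURCE A (Python) =====
-- def analyze_lyrics(lyrics):
--     """Analyze lyrics structure and content"""
--     if not lyrics:
--         return {'char_count': 0, 'line_count': 0, 'word_count': 0, 'section_count': 0}
--
--     lines = lyrics.split('\n')
--     words = lyrics.split()
--
--     # Count section headers (like [Verse 1], [Chorus], etc.)
--     section_count = sum(1 for line in lines if line.strip().startswith('[') and line.strip().endswith(']'))
--
--     return {
--         'char_count': len(lyrics),
--         'line_count': len(lines),
--         'word_count': len(words),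
--         'section_count': section_count
--     }
-- ===== SOURCE B (Python) =====
-- def analyze_lyrics(lyrics):
--     """Analyze lyrics via a single character-level state machine (no splits)."""
--     char_count = 0
--     newline_count = 0
--     word_count = 0
--     in_word = False
--     section_count = 0
--     first = None   # first non-whitespace char of the current line
--     last = None    # last non-whitespace char of the current line
--     for c in lyrics:
--         char_count += 1
--         if c == '\n':
--             newline_count += 1
--             if first == '[' and last == ']':
--                 section_count += 1
--             first = None
--             last = None
--             in_word = False
--         elif c.isspace():
--             in_word = False
--         else:
--             if first is None:
--                 first = c
--             last = c
--             if not in_word: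
--                 in_word = True
--                 word_count += 1
--     if first == '[' and last == ']':
--         section_count += 1
--     if char_count == 0:
--         return {'char_count': 0, 'line_count': 0, 'word_count': 0, 'section_count': 0}
--     return {'char_count': char_count, 'line_count': newline_count + 1,
--             'word_count': word_count, 'section_count': section_count}
-- ===== Notes on version B (the rewrite author's own statement) =====
-- stated objective: alternative
-- what changed: Replaces A's split-based passes (line split, whole-string word split, per-line strip/startswith/endswith scan) with a single character-level state machine that counts chars, newlines, word starts, and section headers (tracking the first/last non-whitespace char of each line) in one pass, never materialising lines or words.
import Mathlib
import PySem

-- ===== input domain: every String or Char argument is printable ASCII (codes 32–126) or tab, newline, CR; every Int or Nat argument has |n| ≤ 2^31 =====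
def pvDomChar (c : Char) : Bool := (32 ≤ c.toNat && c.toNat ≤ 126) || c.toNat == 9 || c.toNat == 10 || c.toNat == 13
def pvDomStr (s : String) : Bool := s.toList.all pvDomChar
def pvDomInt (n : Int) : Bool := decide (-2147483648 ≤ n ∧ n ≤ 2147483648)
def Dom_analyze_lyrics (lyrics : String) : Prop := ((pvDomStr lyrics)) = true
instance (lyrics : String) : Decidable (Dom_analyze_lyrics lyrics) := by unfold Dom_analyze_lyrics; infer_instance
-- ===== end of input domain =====

-- B replaces A's split-based passes (line split, whole-string word split, per-line strip scan)
-- by a single character-level state machine counting chars, newlines, word starts and section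
-- headers in one pass; same results, proved equal (objective: alternative algorithm).

-- ===== PORT A =====
def analyze_lyrics (lyrics : String) : List (String × Int) :=
  if lyrics = "" then
    [("char_count", 0), ("line_count", 0), ("word_count", 0), ("section_count", 0)]
  else
    let lines := PySem.Chars.splitOn lyrics.toList ['\n']
    let words := PySem.Chars.split₀ lyrics.toList
    let section_count : Int :=
      ((lines.filter (fun line =>
          PySem.Chars.startswith (PySem.Chars.strip line) ['['] &&
          PySem.Chars.endswith (PySem.Chars.strip line) [']'])).length : Int)
    [("char_count", PySem.Str.len lyrics),
     ("line_count", (lines.length : Int)),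
     ("word_count", (words.length : Int)),
     ("section_count", section_count)]

-- ===== PORT B =====
-- loop body of Source B's for-loop: state (char_count, newline_count, word_count, in_word, first, last, section_count)
def pvBStep (st : Int × Int × Int × Bool × Option Char × Option Char × Int) (c : Char) :
    Int × Int × Int × Bool × Option Char × Option Char × Int :=
  match st with
  | (cc, nl, wc, inw, f, l, sc) =>
    if c = '\n' then
      (cc + 1, nl + 1, wc, false, none, none,
       sc + (if f == some '[' && l == some ']' then 1 else 0))
    else if PySem.Chars.isspace c then
      (cc + 1, nl, wc, false, f, l, sc)
    else
      (cc + 1, nl, (if inw then wc else wc + 1), true, f.or (some c), some c, sc)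

def analyze_lyrics_alt (lyrics : String) : List (String × Int) :=
  match lyrics.toList.foldl pvBStep (0, 0, 0, false, none, none, 0) with
  | (cc, nl, wc, _inw, f, l, sc) =>
    let sc' := sc + (if f == some '[' && l == some ']' then (1 : Int) else 0)
    if cc = 0 then
      [("char_count", 0), ("line_count", 0), ("word_count", 0), ("section_count", 0)]
    else
      [("char_count", cc), ("line_count", nl + 1), ("word_count", wc), ("section_count", sc')]

-- ===== PRECONDITION & SPEC =====
def Spec_analyze_lyrics (lyrics : String) (out : List (String × Int)) : Prop := out = analyze_lyrics_alt lyrics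
instance (lyrics : String) (out : List (String × Int)) : Decidable (Spec_analyze_lyrics lyrics out) := by unfold Spec_analyze_lyrics; infer_instance

-- ===== CLAIM (what is proved, stated in full; the proofs are below) =====
def Claim_equal_analyze_lyrics : Prop := ∀ (lyrics : String), Dom_analyze_lyrics lyrics → Spec_analyze_lyrics lyrics (analyze_lyrics lyrics)

-- ===== LEMMAS AND PROOFS =====

-- number of whitespace-separated words remaining in l, given whether we are currently inside a word
def pvW (l : List Char) (inw : Bool) : Nat :=
  match l with
  | [] => if inw then 1 else 0
  | c :: rest => if PySem.Chars.isspace c then (if inw then 1 else 0) + pvW rest false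
                 else pvW rest true

-- word STARTS remaining in l (what B's in_word machine counts)
def pvWs (l : List Char) (inw : Bool) : Nat :=
  match l with
  | [] => 0
  | c :: rest => if PySem.Chars.isspace c then pvWs rest false
                 else (if inw then 0 else 1) + pvWs rest true

theorem pvW_go (l : List Char) : ∀ (cur : List Char) (acc : List (List Char)),
    (PySem.Chars.split₀.go l cur acc).length = acc.length + pvW l (!cur.isEmpty) := by
  induction l with
  | nil =>
    intro cur acc
    cases cur <;> simp [PySem.Chars.split₀.go, pvW]
  | cons c rest ih =>
    intro cur acc
    by_cases hs : PySem.Chars.isspace c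
    · cases cur with
      | nil => simp [PySem.Chars.split₀.go, hs, pvW, ih]
      | cons x xs => simp [PySem.Chars.split₀.go, hs, pvW, ih]; omega
    · simp [PySem.Chars.split₀.go, hs, pvW, ih]

theorem pvW_split₀ (s : List Char) : (PySem.Chars.split₀ s).length = pvW s false := by
  simpa using pvW_go s [] []

theorem pvWs_eq_pvW (l : List Char) : ∀ inw, pvW l inw = pvWs l inw + (if inw then 1 else 0) := by
  induction l with
  | nil => intro inw; simp [pvW, pvWs]
  | cons c rest ih =>
    intro inw
    by_cases hs : PySem.Chars.isspace c
    · simp [pvW, pvWs, hs, ih false]; omega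
    · simp [pvW, pvWs, hs, ih true]; cases inw <;> simp <;> omega

-- structural newline splitter (always returns at least one line)
def pvSplitNL (l : List Char) : List (List Char) :=
  match l with
  | [] => [[]]
  | c :: rest =>
    if c = '\n' then [] :: pvSplitNL rest
    else match pvSplitNL rest with
      | [] => [[c]]
      | h :: t => (c :: h) :: t

def pvGlue (p : List Char) (ls : List (List Char)) : List (List Char) :=
  match ls with
  | [] => [p]
  | h :: t => (p ++ h) :: t

theorem pvSplitNL_ne_nil (l : List Char) : pvSplitNL l ≠ [] := by
  cases l with
  | nil => simp [pvSplitNL]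
  | cons c rest =>
    simp only [pvSplitNL]
    split <;> try simp
    split <;> simp

theorem pvSplitOn_go (fuel : Nat) : ∀ (l : List Char), l.length ≤ fuel →
    ∀ (cur : List Char) (acc : List (List Char)),
    PySem.Chars.splitOn.go ['\n'] fuel l cur acc = acc.reverse ++ pvGlue cur.reverse (pvSplitNL l) := by
  induction fuel with
  | zero =>
    intro l hl cur acc
    have : l = [] := List.eq_nil_of_length_eq_zero (Nat.le_zero.mp hl)
    subst this
    simp [PySem.Chars.splitOn.go, pvSplitNL, pvGlue]
  | succ fuel ih =>
    intro l hl cur acc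
    cases l with
    | nil => simp [PySem.Chars.splitOn.go, pvSplitNL, pvGlue]
    | cons c rest =>
      by_cases hc : c = '\n'
      · subst hc
        have : PySem.Chars.splitOn.go ['\n'] (fuel + 1) ('\n' :: rest) cur acc
            = PySem.Chars.splitOn.go ['\n'] fuel rest [] (cur.reverse :: acc) := by
          simp [PySem.Chars.splitOn.go, List.isPrefixOf]
        rw [this, ih rest (by simpa using Nat.lt_succ_iff.mp (by simpa using hl)) [] (cur.reverse :: acc)]
        rcases hsp : pvSplitNL rest with _ | ⟨h, t⟩
        · exact absurd hsp (pvSplitNL_ne_nil rest)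
        · simp [pvSplitNL, hsp, pvGlue]
      · have : PySem.Chars.splitOn.go ['\n'] (fuel + 1) (c :: rest) cur acc
            = PySem.Chars.splitOn.go ['\n'] fuel rest (c :: cur) acc := by
          simp [PySem.Chars.splitOn.go, List.isPrefixOf]
          intro h; exact absurd h.symm hc
        rw [this, ih rest (by simpa using Nat.lt_succ_iff.mp (by simpa using hl)) (c :: cur) acc]
        rcases hsp : pvSplitNL rest with _ | ⟨h, t⟩
        · exact absurd hsp (pvSplitNL_ne_nil rest)
        · simp [pvSplitNL, hc, hsp, pvGlue]

theorem pvSplitOn_eq (s : List Char) : PySem.Chars.splitOn s ['\n'] = pvSplitNL s := by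
  unfold PySem.Chars.splitOn
  rw [pvSplitOn_go (s.length + 1) s (by omega) [] []]
  rcases hsp : pvSplitNL s with _ | ⟨h, t⟩
  · exact absurd hsp (pvSplitNL_ne_nil s)
  · simp [pvGlue]

theorem pvSplitNL_length (s : List Char) : (pvSplitNL s).length = s.count '\n' + 1 := by
  induction s with
  | nil => simp [pvSplitNL]
  | cons c rest ih =>
    by_cases hc : c = '\n'
    · subst hc; simp [pvSplitNL, List.count_cons, ih]
    · rcases hsp : pvSplitNL rest with _ | ⟨h, t⟩
      · exact absurd hsp (pvSplitNL_ne_nil rest)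
      · simp only [pvSplitNL, if_neg hc, hsp, List.length_cons, List.count_cons]
        rw [hsp] at ih
        simp only [List.length_cons] at ih
        simp [ih, hc]

theorem pvSplitNL_no_nl (s : List Char) : ∀ x ∈ pvSplitNL s, '\n' ∉ x := by
  induction s with
  | nil => intro x hx; simp [pvSplitNL] at hx; simp [hx]
  | cons c rest ih =>
    intro x hx
    by_cases hc : c = '\n'
    · subst hc
      rw [show pvSplitNL ('\n' :: rest) = [] :: pvSplitNL rest from by simp [pvSplitNL]] at hx
      rcases List.mem_cons.mp hx with rfl | hx
      · simp
      · exact ih x hx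
    · cases hsp : pvSplitNL rest with
      | nil => exact absurd hsp (pvSplitNL_ne_nil rest)
      | cons h t =>
        rw [show pvSplitNL (c :: rest) = (c :: h) :: t from by simp [pvSplitNL, hc, hsp]] at hx
        rcases List.mem_cons.mp hx with rfl | hx
        · intro hmem
          rcases List.mem_cons.mp hmem with rfl | hmem
          · exact hc rfl
          · exact ih h (by simp [hsp]) hmem
        · exact ih x (by simp [hsp, hx])

-- the character-machine components, as folds
def pvFStep (a : Option Char) (c : Char) : Option Char :=
  if c = '\n' then none else if PySem.Chars.isspace c then a else a.or (some c)
def pvF (cs : List Char) (f : Option Char) : Option Char := cs.foldl pvFStep f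
def pvLStep (a : Option Char) (c : Char) : Option Char :=
  if c = '\n' then none else if PySem.Chars.isspace c then a else some c
def pvL (cs : List Char) (l : Option Char) : Option Char := cs.foldl pvLStep l
def pvIn (cs : List Char) (inw : Bool) : Bool :=
  cs.foldl (fun _a c => if PySem.Chars.isspace c then false else true) inw

-- sections completed (i.e. closed by a '\n') in cs, given first/last of the current line
def pvSC (cs : List Char) (f l : Option Char) : Nat :=
  match cs with
  | [] => 0
  | c :: rest =>
    if c = '\n' then (if f == some '[' && l == some ']' then 1 else 0) + pvSC rest none none
    else if PySem.Chars.isspace c then pvSC rest f l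
    else pvSC rest (f.or (some c)) (some c)

theorem pvF_nil (f : Option Char) : pvF [] f = f := rfl
theorem pvF_cons (c : Char) (r : List Char) (f : Option Char) : pvF (c :: r) f = pvF r (pvFStep f c) := rfl
theorem pvL_nil (l : Option Char) : pvL [] l = l := rfl
theorem pvL_cons (c : Char) (r : List Char) (l : Option Char) : pvL (c :: r) l = pvL r (pvLStep l c) := rfl

theorem pv_fold (cs : List Char) : ∀ (cc nl wc : Int) (inw : Bool) (f l : Option Char) (sc : Int),
    cs.foldl pvBStep (cc, nl, wc, inw, f, l, sc) =
    (cc + cs.length, nl + cs.count '\n', wc + pvWs cs inw, pvIn cs inw, pvF cs f, pvL cs l,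
     sc + pvSC cs f l) := by
  induction cs with
  | nil => intro cc nl wc inw f l sc; simp [pvWs, pvIn, pvF, pvL, pvSC]
  | cons c rest ih =>
    intro cc nl wc inw f l sc
    by_cases hc : c = '\n'
    · subst hc
      have hs : PySem.Chars.isspace '\n' = true := by decide
      rw [List.foldl_cons,
        show pvBStep (cc, nl, wc, inw, f, l, sc) '\n'
          = (cc + 1, nl + 1, wc, false, none, none,
             sc + (if f == some '[' && l == some ']' then 1 else 0)) from by simp [pvBStep], ih,
        show pvWs ('\n' :: rest) inw = pvWs rest false from by simp [pvWs, hs],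
        show pvIn ('\n' :: rest) inw = pvIn rest false from by simp [pvIn, List.foldl_cons, hs],
        show pvF ('\n' :: rest) f = pvF rest none from by rw [pvF_cons]; simp [pvFStep],
        show pvL ('\n' :: rest) l = pvL rest none from by rw [pvL_cons]; simp [pvLStep],
        show pvSC ('\n' :: rest) f l
          = (if f == some '[' && l == some ']' then 1 else 0) + pvSC rest none none from by
            simp [pvSC],
        List.count_cons_self, List.length_cons]
      simp only [Prod.mk.injEq]
      and_intros <;> first | trivial | (push_cast; ring)
    · have hcount : List.count '\n' (c :: rest) = List.count '\n' rest := by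
        simp [List.count_cons, hc]
      by_cases hs : PySem.Chars.isspace c
      · rw [List.foldl_cons,
          show pvBStep (cc, nl, wc, inw, f, l, sc) c = (cc + 1, nl, wc, false, f, l, sc) from by
            simp [pvBStep, hc, hs], ih,
          show pvWs (c :: rest) inw = pvWs rest false from by simp [pvWs, hs],
          show pvIn (c :: rest) inw = pvIn rest false from by simp [pvIn, List.foldl_cons, hs],
          show pvF (c :: rest) f = pvF rest f from by rw [pvF_cons]; simp [pvFStep, hc, hs],
          show pvL (c :: rest) l = pvL rest l from by rw [pvL_cons]; simp [pvLStep, hc, hs],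
          show pvSC (c :: rest) f l = pvSC rest f l from by simp [pvSC, hc, hs],
          hcount, List.length_cons]
        simp only [Prod.mk.injEq]
        and_intros <;> first | trivial | (push_cast; ring)
      · rw [List.foldl_cons,
          show pvBStep (cc, nl, wc, inw, f, l, sc) c
            = (cc + 1, nl, (if inw then wc else wc + 1), true, f.or (some c), some c, sc) from by
              simp [pvBStep, hc, hs], ih,
          show pvWs (c :: rest) inw = (if inw then 0 else 1) + pvWs rest true from by
            simp [pvWs, hs],
          show pvIn (c :: rest) inw = pvIn rest true from by simp [pvIn, List.foldl_cons, hs],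
          show pvF (c :: rest) f = pvF rest (f.or (some c)) from by
            rw [pvF_cons]; simp [pvFStep, hc, hs],
          show pvL (c :: rest) l = pvL rest (some c) from by
            rw [pvL_cons]; simp [pvLStep, hc, hs],
          show pvSC (c :: rest) f l = pvSC rest (f.or (some c)) (some c) from by
            simp [pvSC, hc, hs],
          hcount, List.length_cons]
        simp only [Prod.mk.injEq]
        and_intros <;> cases inw <;> simp <;> (try (push_cast; ring)) <;> omega

theorem pv_sec_lines (s : List Char) : ∀ (f l : Option Char) (h : List Char) (t : List (List Char)),
    pvSplitNL s = h :: t →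
    pvSC s f l + (if pvF s f == some '[' && pvL s l == some ']' then 1 else 0)
    = (if pvF h f == some '[' && pvL h l == some ']' then 1 else 0)
      + (t.map (fun x => if pvF x none == some '[' && pvL x none == some ']' then (1 : Nat) else 0)).sum := by
  induction s with
  | nil =>
    intro f l h t heq
    simp only [pvSplitNL] at heq
    obtain ⟨rfl, rfl⟩ : h = [] ∧ t = [] := by
      constructor <;> injection heq <;> simp_all
    simp [pvSC, pvF, pvL]
  | cons c rest ih =>
    intro f l h t heq
    rcases hsp : pvSplitNL rest with _ | ⟨h', t'⟩
    · exact absurd hsp (pvSplitNL_ne_nil rest)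
    by_cases hc : c = '\n'
    · subst hc
      simp only [pvSplitNL, if_pos rfl, hsp] at heq
      obtain ⟨rfl, rfl⟩ : h = [] ∧ t = h' :: t' := by
        constructor <;> injection heq <;> simp_all
      have hF : pvF ('\n' :: rest) f = pvF rest none := by
        rw [pvF_cons]; simp [pvFStep]
      have hL : pvL ('\n' :: rest) l = pvL rest none := by
        rw [pvL_cons]; simp [pvLStep]
      have hSC : pvSC ('\n' :: rest) f l
          = (if f == some '[' && l == some ']' then 1 else 0) + pvSC rest none none := by
        simp [pvSC]
      rw [hSC, hF, hL, pvF_nil, pvL_nil, List.map_cons, List.sum_cons]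
      have H := ih none none h' t' hsp
      omega
    · simp only [pvSplitNL, if_neg hc, hsp] at heq
      obtain ⟨rfl, rfl⟩ : h = c :: h' ∧ t = t' := by
        constructor <;> injection heq <;> simp_all
      by_cases hs : PySem.Chars.isspace c
      · have hF : ∀ g : Option Char, pvF (c :: h') g = pvF h' g ∧ pvF (c :: rest) g = pvF rest g := by
          intro g; constructor <;> (rw [pvF_cons]; simp [pvFStep, hc, hs])
        have hL : ∀ g : Option Char, pvL (c :: h') g = pvL h' g ∧ pvL (c :: rest) g = pvL rest g := by
          intro g; constructor <;> (rw [pvL_cons]; simp [pvLStep, hc, hs])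
        have hSC : pvSC (c :: rest) f l = pvSC rest f l := by simp [pvSC, hc, hs]
        rw [hSC, (hF f).2, (hL l).2, (hF f).1, (hL l).1]
        exact ih f l h' t hsp
      · have hF : ∀ g : Option Char, pvF (c :: h') g = pvF h' (g.or (some c))
            ∧ pvF (c :: rest) g = pvF rest (g.or (some c)) := by
          intro g; constructor <;> (rw [pvF_cons]; simp [pvFStep, hc, hs])
        have hL : ∀ g : Option Char, pvL (c :: h') g = pvL h' (some c)
            ∧ pvL (c :: rest) g = pvL rest (some c) := by
          intro g; constructor <;> (rw [pvL_cons]; simp [pvLStep, hc, hs])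
        have hSC : pvSC (c :: rest) f l = pvSC rest (f.or (some c)) (some c) := by
          simp [pvSC, hc, hs]
        rw [hSC, (hF f).2, (hL l).2, (hF f).1, (hL l).1]
        exact ih (f.or (some c)) (some c) h' t hsp

theorem pvF_const (cs : List Char) : ∀ (a : Char), '\n' ∉ cs → pvF cs (some a) = some a := by
  induction cs with
  | nil => intro a _; simp [pvF]
  | cons c rest ih =>
    intro a hnl
    have hc : c ≠ '\n' := fun h => hnl (by simp [h])
    have hrest : '\n' ∉ rest := fun h => hnl (List.mem_cons_of_mem _ h)
    by_cases hs : PySem.Chars.isspace c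
    · simp only [pvF, List.foldl_cons, pvFStep, if_neg hc, if_pos hs]
      exact ih a hrest
    · simp only [pvF, List.foldl_cons, pvFStep, if_neg hc, if_neg hs, Option.or]
      exact ih a hrest

theorem pv_rstrip_cons_nonspace (c : Char) (r : List Char) (h : PySem.Chars.isspace c = false) :
    PySem.Chars.rstrip (c :: r) = c :: PySem.Chars.rstrip r := by
  simp only [PySem.Chars.rstrip, List.reverse_cons, List.dropWhile_append]
  by_cases he : (List.dropWhile PySem.Chars.isspace r.reverse).isEmpty
  · simp [he, List.dropWhile, h, List.isEmpty_iff.mp he]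
  · simp [he]

theorem pv_rstrip_snoc_space (x : List Char) (c : Char) (h : PySem.Chars.isspace c = true) :
    PySem.Chars.rstrip (x ++ [c]) = PySem.Chars.rstrip x := by
  simp [PySem.Chars.rstrip, List.dropWhile, h]

theorem pv_strip_snoc (r : List Char) (c : Char) :
    PySem.Chars.strip (r ++ [c]) =
      if PySem.Chars.isspace c then PySem.Chars.strip r else PySem.Chars.lstrip r ++ [c] := by
  by_cases hs : PySem.Chars.isspace c
  · simp only [if_pos hs, PySem.Chars.strip, PySem.Chars.lstrip, List.dropWhile_append]
    by_cases he : (List.dropWhile PySem.Chars.isspace r).isEmpty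
    · simp [he, List.dropWhile, hs, List.isEmpty_iff.mp he]
    · simp only [he, Bool.false_eq_true, if_false]
      exact pv_rstrip_snoc_space _ c hs
  · simp only [if_neg hs, PySem.Chars.strip, PySem.Chars.lstrip, List.dropWhile_append]
    by_cases he : (List.dropWhile PySem.Chars.isspace r).isEmpty
    · simp [he, List.dropWhile, hs, List.isEmpty_iff.mp he, PySem.Chars.rstrip]
    · simp only [he, Bool.false_eq_true, if_false]
      -- rstrip (x ++ [c]) = x ++ [c] for nonspace c
      simp [PySem.Chars.rstrip, List.dropWhile, hs]

theorem pv_cond_head (line : List Char) (hnl : '\n' ∉ line) :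
    PySem.Chars.startswith (PySem.Chars.strip line) ['['] = (pvF line none == some '[') := by
  induction line with
  | nil => simp [PySem.Chars.strip, PySem.Chars.lstrip, PySem.Chars.rstrip,
      PySem.Chars.startswith, List.isPrefixOf, pvF]
  | cons c rest ih =>
    have hc : c ≠ '\n' := fun h => hnl (by simp [h])
    have hrest : '\n' ∉ rest := fun h => hnl (List.mem_cons_of_mem _ h)
    by_cases hs : PySem.Chars.isspace c
    · have hstrip : PySem.Chars.strip (c :: rest) = PySem.Chars.strip rest := by
        simp [PySem.Chars.strip, PySem.Chars.lstrip, List.dropWhile, hs]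
      have hf : pvF (c :: rest) none = pvF rest none := by
        simp [pvF, pvFStep, hc, hs]
      rw [hstrip, hf]; exact ih hrest
    · have hstrip : PySem.Chars.strip (c :: rest) = c :: PySem.Chars.rstrip rest := by
        simp only [PySem.Chars.strip, PySem.Chars.lstrip, List.dropWhile, hs]
        exact pv_rstrip_cons_nonspace c rest (by simp [hs])
      have hf : pvF (c :: rest) none = some c := by
        simp only [pvF, List.foldl_cons, pvFStep, if_neg hc, if_neg hs, Option.or]
        exact pvF_const rest c hrest
      rw [hstrip, hf]
      simp [PySem.Chars.startswith, List.isPrefixOf, eq_comm]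

theorem pv_cond_last (line : List Char) (hnl : '\n' ∉ line) :
    PySem.Chars.endswith (PySem.Chars.strip line) [']'] = (pvL line none == some ']') := by
  induction line using List.reverseRecOn with
  | nil => simp [PySem.Chars.strip, PySem.Chars.lstrip, PySem.Chars.rstrip,
      PySem.Chars.endswith, List.isSuffixOf, List.isPrefixOf, pvL]
  | append_singleton r c ih =>
    have hc : c ≠ '\n' := fun h => hnl (by simp [h])
    have hr : '\n' ∉ r := fun h => hnl (by simp [h])
    by_cases hs : PySem.Chars.isspace c
    · have hl : pvL (r ++ [c]) none = pvL r none := by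
        simp [pvL, List.foldl_append, pvLStep, hc, hs]
      rw [pv_strip_snoc, if_pos hs, hl]; exact ih hr
    · have hl : pvL (r ++ [c]) none = some c := by
        simp [pvL, List.foldl_append, pvLStep, hc, hs]
      rw [pv_strip_snoc, if_neg hs, hl]
      simp only [PySem.Chars.endswith, List.isSuffixOf, List.reverse_append, List.reverse_cons,
        List.reverse_nil, List.nil_append, List.isPrefixOf]
      simp [List.isPrefixOf, eq_comm]

theorem pv_filter_sum (ls : List (List Char)) (h : ∀ x ∈ ls, '\n' ∉ x) :
    (ls.map (fun x => if pvF x none == some '[' && pvL x none == some ']' then (1 : Nat) else 0)).sum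
    = (ls.filter (fun line =>
        PySem.Chars.startswith (PySem.Chars.strip line) ['['] &&
        PySem.Chars.endswith (PySem.Chars.strip line) [']'])).length := by
  induction ls with
  | nil => simp
  | cons x xs ih =>
    have hx : '\n' ∉ x := h x (by simp)
    have hxs : ∀ y ∈ xs, '\n' ∉ y := fun y hy => h y (by simp [hy])
    have hcx : (PySem.Chars.startswith (PySem.Chars.strip x) ['['] &&
        PySem.Chars.endswith (PySem.Chars.strip x) [']'])
        = (pvF x none == some '[' && pvL x none == some ']') := by
      rw [pv_cond_head x hx, pv_cond_last x hx]
    have IH := ih hxs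
    simp only [List.map_cons, List.sum_cons, List.filter_cons, hcx]
    cases hcond : (pvF x none == some '[' && pvL x none == some ']') with
    | false =>
      simp only [hcond, Bool.false_eq_true, if_false]
      omega
    | true =>
      simp only [hcond, if_true, List.length_cons]
      omega

theorem pv_toList_eq_nil (s : String) : s.toList = [] ↔ s = "" := by
  constructor
  · intro h
    have := congrArg String.ofList h
    simpa using this
  · intro h; simp [h]

-- ===== VERDICT (by name: the statement is the Claim_ definition above) =====
theorem analyze_lyrics_spec : Claim_equal_analyze_lyrics := by
  intro lyrics _
  unfold Spec_analyze_lyrics analyze_lyrics analyze_lyrics_alt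
  rw [pv_fold]
  by_cases h : lyrics = ""
  · subst h; decide
  · have hne : lyrics.toList ≠ [] := fun hh => h ((pv_toList_eq_nil lyrics).mp hh)
    have hcc : (0 : Int) + (lyrics.toList.length : Int) ≠ 0 := by
      have : 0 < lyrics.toList.length := List.length_pos_of_ne_nil hne
      omega
    simp only [h, if_false, hcc, if_neg hcc]
    rcases hsp : pvSplitNL lyrics.toList with _ | ⟨hd, tl⟩
    · exact absurd hsp (pvSplitNL_ne_nil lyrics.toList)
    have hsec := pv_sec_lines lyrics.toList none none hd tl hsp
    have hnonl := pvSplitNL_no_nl lyrics.toList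
    rw [hsp] at hnonl
    have hfs := pv_filter_sum (hd :: tl) hnonl
    simp only [List.map_cons, List.sum_cons] at hfs
    show _ =
      [("char_count", (0 : Int) + (lyrics.toList.length : Int)),
       ("line_count", ((0 : Int) + (List.count '\n' lyrics.toList : Int)) + 1),
       ("word_count", (0 : Int) + (pvWs lyrics.toList false : Int)),
       ("section_count", ((0 : Int) + (pvSC lyrics.toList none none : Int)) +
         (if pvF lyrics.toList none == some '[' && pvL lyrics.toList none == some ']'
          then (1 : Int) else 0))]
    simp only [List.cons.injEq, Prod.mk.injEq, and_true]
    and_intros <;>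
      first
        | rfl
        | (simp [PySem.Str.len]; done)
        | (rw [pvSplitOn_eq, pvSplitNL_length]; push_cast; ring)
        | (rw [pvW_split₀, pvWs_eq_pvW]; simp; done)
        | (rw [pvSplitOn_eq, hsp, ← hfs, ← hsec]; push_cast; ring)
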